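-- pv_equiv track=rewrite | github.com/GordonBreazz/CODEWARS | Python/5kyu--Typoglycemia-Generator.py | map_item
-- ===== SOURCE A (Python) =====
-- def map_item(item):
--     arr = list(item)
--     alphabet_symbols = 'abcdefghijklmnopqrstuvwxyzABCDEFGHIJKLMNOPQRSTUVWXYZ'
--     first, last, k = 0, 0, 0
--
--     for i in range(len(arr)):
--         if arr[i] in alphabet_symbols:
--             first = i
--             break
--
--     for i in reversed(range(len(arr))):
--         if arr[i] in alphabet_symbols:
--             last = i
--             break
--
--     dic = sorted(filter(lambda x: x in alphabet_symbols, arr[first+1:last]))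
--
--     for i in range(first+1,last):
--         if arr[i] in alphabet_symbols:
--             arr[i] = dic[k]
--             k += 1
--
--     return str.join('', arr)
-- ===== SOURCE B (Python) =====
-- def map_item(item):
--     LETTERS = 'ABCDEFGHIJKLMNOPQRSTUVWXYZabcdefghijklmnopqrstuvwxyz'
--     # one pass: first and last alphabetic positions (-1 = none yet)
--     first, last = -1, -1
--     for i, c in enumerate(item):
--         if c in LETTERS:
--             if first < 0:
--                 first = i
--             last = i
--     # counting sort of the letters strictly between first and last
--     counts = {}
--     for c in item[first + 1:last]:
--         if c in LETTERS:
--             counts[c] = counts.get(c, 0) + 1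
--     ordered = [c for c in LETTERS for _ in range(counts.get(c, 0))]
--     # rebuild, feeding the counted letters back in sorted order
--     it = iter(ordered)
--     res = []
--     for i, c in enumerate(item):
--         if first < i < last and c in LETTERS:
--             res.append(next(it))
--         else:
--             res.append(c)
--     return ''.join(res)
-- ===== Notes on version B (the rewrite author's own statement) =====
-- stated objective: alternative
-- what changed: Replaces the comparison sort of the middle letters by a counting sort over the fixed 52-letter alphabet, finds the first/last letter in one combined scan instead of two index loops, and rebuilds the string by consuming the counted letters in order instead of indexed in-place assignment.
import Mathlib
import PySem

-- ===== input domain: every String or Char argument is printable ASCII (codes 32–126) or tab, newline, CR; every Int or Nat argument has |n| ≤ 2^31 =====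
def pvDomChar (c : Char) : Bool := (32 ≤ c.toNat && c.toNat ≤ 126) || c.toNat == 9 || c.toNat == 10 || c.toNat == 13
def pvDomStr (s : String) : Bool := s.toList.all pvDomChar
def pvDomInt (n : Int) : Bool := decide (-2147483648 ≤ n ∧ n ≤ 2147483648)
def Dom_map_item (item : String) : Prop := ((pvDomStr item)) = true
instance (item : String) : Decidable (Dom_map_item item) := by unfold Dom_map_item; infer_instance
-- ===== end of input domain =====

set_option maxHeartbeats 1000000

-- B replaces A's comparison sort of the middle letters by a counting sort over the fixed
-- 52-letter alphabet, with a single combined scan for the first/last letter (objective: alternative).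

-- ===== PORT A =====
def pvAlphaA : List Char := "abcdefghijklmnopqrstuvwxyzABCDEFGHIJKLMNOPQRSTUVWXYZ".toList

-- 'x in alphabet_symbols'
def pvIsL (c : Char) : Bool := c ∈ pvAlphaA

-- 'for i in range(len(arr)): if arr[i] in alphabet_symbols: first = i; break'  (first = 0 if no hit)
def pvScanFirst (arr : List Char) (i : Nat) : Nat :=
  if i < arr.length then
    if pvIsL (arr.getD i ' ') then i else pvScanFirst arr (i + 1)
  else 0
termination_by arr.length - i

-- 'for i in reversed(range(len(arr))): if arr[i] in alphabet_symbols: last = i; break'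
def pvScanLast (arr : List Char) : Nat → Nat
  | 0 => 0
  | k + 1 => if pvIsL (arr.getD k ' ') then k else pvScanLast arr k

-- loop body of 'for i in range(first+1, last): if arr[i] in …: arr[i] = dic[k]; k += 1'
def pvStepA (dic : List Char) (st : List Char × Nat) (i : Nat) : List Char × Nat :=
  if pvIsL (st.1.getD i ' ') then (st.1.set i (dic.getD st.2 ' '), st.2 + 1) else st

def map_item (item : String) : String :=
  let arr := item.toList
  let first := pvScanFirst arr 0
  let last := pvScanLast arr arr.length
  let dic := PySem.List.sorted
      ((PySem.List.slice arr (some ((first : Int) + 1)) (some (last : Int))).filter pvIsL)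
      (fun x => x)
  let fin := (List.range' (first + 1) (last - (first + 1))).foldl (pvStepA dic) (arr, 0)
  String.ofList fin.1

-- ===== PORT B =====
def pvAlphaB : List Char := "ABCDEFGHIJKLMNOPQRSTUVWXYZabcdefghijklmnopqrstuvwxyz".toList

-- 'c in LETTERS'
def pvIsLB (c : Char) : Bool := c ∈ pvAlphaB

-- body of the combined first/last scan
def pvStepFL (p : Int × Int) (ic : Int × Char) : Int × Int :=
  if pvIsLB ic.2 then (if p.1 < 0 then (ic.1, ic.1) else (p.1, ic.1)) else p

-- 'counts[c] = counts.get(c, 0) + 1' guarded by 'c in LETTERS'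
def pvStepCount (d : PySem.Dict Char Int) (c : Char) : PySem.Dict Char Int :=
  if pvIsLB c then d.insert c (d.getD c 0 + 1) else d

-- rebuild-loop body: replace a letter strictly between first and last by the next counted letter
def pvStepR (first last : Int) (st : List Char × List Char) (ic : Int × Char) : List Char × List Char :=
  if first < ic.1 ∧ ic.1 < last ∧ pvIsLB ic.2 then
    match st.2 with
    | r :: rs => (st.1 ++ [r], rs)
    | [] => (st.1 ++ [ic.2], [])   -- unreachable: one counted letter exists per replaced position
  else (st.1 ++ [ic.2], st.2)

def map_item_alt (item : String) : String :=
  let cs := item.toList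
  let fl := (PySem.List.enumerate cs 0).foldl pvStepFL (-1, -1)
  let first := fl.1
  let last := fl.2
  let counts := (PySem.List.slice cs (some (first + 1)) (some last)).foldl pvStepCount PySem.Dict.empty
  let ordered := pvAlphaB.flatMap (fun c => List.replicate (counts.getD c 0).toNat c)
  let res := (PySem.List.enumerate cs 0).foldl (pvStepR first last) ([], ordered)
  String.ofList res.1

-- ===== PRECONDITION & SPEC =====
def Spec_map_item (item : String) (out : String) : Prop := out = map_item_alt item
instance (item : String) (out : String) : Decidable (Spec_map_item item out) := by unfold Spec_map_item; infer_instance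

-- ===== CLAIM (what is proved, stated in full; the proofs are below) =====
def Claim_equal_map_item : Prop := ∀ (item : String), Dom_map_item item → Spec_map_item item (map_item item)

-- ===== LEMMAS AND PROOFS =====

theorem permAB : pvAlphaA.Perm pvAlphaB := by decide

-- the two letter tests agree
theorem pv_memAB (c : Char) : pvIsLB c = pvIsL c := by
  simp only [pvIsL, pvIsLB, decide_eq_decide]
  exact permAB.symm.mem_iff

theorem nodupB : pvAlphaB.Nodup := by decide

theorem pairB : pvAlphaB.Pairwise (· < ·) := by decide

-- replace letters of the first list by successive elements of the second
def pvMerge : List Char → List Char → List Char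
  | [], _ => []
  | c :: xs, ds =>
    if pvIsL c then
      match ds with
      | d :: ds' => d :: pvMerge xs ds'
      | [] => c :: pvMerge xs []
    else c :: pvMerge xs ds

theorem pv_scanFirst_eq (arr : List Char) (i : Nat) :
    pvScanFirst arr i = ((arr.drop i).findIdx? pvIsL).elim 0 (i + ·) := by
  induction i using pvScanFirst.induct (arr := arr) with
  | case1 i h hL =>
    rw [pvScanFirst, if_pos h, if_pos hL]
    rw [List.drop_eq_getElem_cons h, List.findIdx?_cons]
    rw [List.getD_eq_getElem _ _ h] at hL
    simp [hL]
  | case2 i h hL ih =>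
    rw [pvScanFirst, if_pos h, if_neg hL]
    rw [List.drop_eq_getElem_cons h, List.findIdx?_cons]
    rw [List.getD_eq_getElem _ _ h] at hL
    simp only [Bool.not_eq_true] at hL
    rw [hL]
    simp only [if_neg Bool.false_ne_true]
    rw [ih]
    cases hfi : (arr.drop (i+1)).findIdx? pvIsL <;> simp [hfi] <;> omega
  | case3 i h =>
    rw [pvScanFirst, if_neg h]
    rw [List.drop_eq_nil_of_le (by omega)]
    simp

theorem pv_scanLast_eq (arr : List Char) (k : Nat) (hk : k ≤ arr.length) :
    pvScanLast arr k = ((arr.take k).reverse.findIdx? pvIsL).elim 0 (fun r => k - 1 - r) := by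
  induction k with
  | zero => simp [pvScanLast]
  | succ k ih =>
    have hklen : k < arr.length := by omega
    rw [pvScanLast]
    rw [List.take_add_one, List.getElem?_eq_getElem hklen]
    simp only [Option.toList_some, List.reverse_append, List.reverse_cons, List.reverse_nil,
      List.nil_append, List.singleton_append, List.findIdx?_cons]
    rw [List.getD_eq_getElem _ _ hklen]
    by_cases hL : pvIsL arr[k]
    · simp [hL]
    · simp only [Bool.not_eq_true] at hL
      rw [hL]
      simp only [if_neg Bool.false_ne_true]
      rw [ih (by omega)]
      cases hfi : (arr.take k).reverse.findIdx? pvIsL <;> simp [hfi] <;> omega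

theorem pv_revlt {xs : List Char} {r : Nat} (h : xs.reverse.findIdx? pvIsL = some r) :
    r < xs.length := by
  have := (List.findIdx?_eq_some_iff_findIdx_eq.mp h).1
  simpa using this

theorem pv_letter_at {xs : List Char} {i : Nat} (h : xs.findIdx? pvIsL = some i)
    (hi : i < xs.length) : pvIsL xs[i] = true := by
  obtain ⟨h1, h2⟩ := List.findIdx?_eq_some_iff_findIdx_eq.mp h
  subst h2
  exact List.findIdx_getElem

theorem pv_first_min {xs : List Char} {i : Nat} (h : xs.findIdx? pvIsL = some i)
    (j : Nat) (hj : j < xs.length) (hL : pvIsL xs[j] = true) : i ≤ j := by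
  obtain ⟨h1, h2⟩ := List.findIdx?_eq_some_iff_findIdx_eq.mp h
  by_contra hlt
  have hfalse := List.not_of_lt_findIdx (p := pvIsL) (xs := xs) (i := j) (by omega)
  exact absurd (hL.symm.trans hfalse) (by decide)

theorem pv_foldFL (xs : List Char) : ∀ (j : Int) (p : Int × Int), 0 ≤ j →
    (PySem.List.enumerate xs j).foldl pvStepFL p =
      ( (xs.findIdx? pvIsL).elim p.1 (fun f => if p.1 < 0 then j + f else p.1),
        (xs.reverse.findIdx? pvIsL).elim p.2 (fun r => j + ((xs.length - 1 - r : Nat) : Int)) ) := by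
  induction xs with
  | nil => intro j p hj; simp [PySem.List.enumerate_nil]
  | cons c xs' ih =>
    intro j p hj
    rw [PySem.List.enumerate_cons, List.foldl_cons, ih (j+1) _ (by omega)]
    rw [List.reverse_cons, List.findIdx?_append, List.findIdx?_cons, List.findIdx?_cons,
      List.findIdx?_nil]
    by_cases hc : pvIsL c
      <;> cases hf' : xs'.findIdx? pvIsL
      <;> cases hr' : xs'.reverse.findIdx? pvIsL
      <;> simp [pvStepFL, pv_memAB, hc, hf', hr', Prod.ext_iff,
            apply_ite (f := Prod.fst (α := Int) (β := Int)),
            apply_ite (f := Prod.snd (α := Int) (β := Int))]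
      <;> first
        | omega
        | (have hrlt := pv_revlt hr'; omega)

theorem pv_foldSkip (first last : Int) (xs : List Char) : ∀ (j : Int) (res rest : List Char),
    (∀ i c, (i, c) ∈ PySem.List.enumerate xs j → ¬(first < i ∧ i < last ∧ pvIsL c)) →
    (PySem.List.enumerate xs j).foldl (pvStepR first last) (res, rest) = (res ++ xs, rest) := by
  induction xs with
  | nil => intro j res rest _; simp [PySem.List.enumerate_nil]
  | cons c xs' ih =>
    intro j res rest h
    rw [PySem.List.enumerate_cons, List.foldl_cons]
    have hc := h j c (by rw [PySem.List.enumerate_cons]; exact List.mem_cons_self)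
    rw [pvStepR, if_neg (by simpa [pv_memAB] using hc)]
    rw [ih (j+1) (res ++ [c]) rest
      (fun i c' hm => h i c' (by rw [PySem.List.enumerate_cons]; exact List.mem_cons_of_mem _ hm))]
    simp

theorem pv_foldMid (first last : Int) (xs : List Char) : ∀ (j : Int) (res rest : List Char),
    (∀ i c, (i, c) ∈ PySem.List.enumerate xs j → first < i ∧ i < last) →
    (PySem.List.enumerate xs j).foldl (pvStepR first last) (res, rest)
      = (res ++ pvMerge xs rest, rest.drop (xs.countP pvIsL)) := by
  induction xs with
  | nil => intro j res rest _; simp [PySem.List.enumerate_nil, pvMerge]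
  | cons c xs' ih =>
    intro j res rest h
    rw [PySem.List.enumerate_cons, List.foldl_cons]
    have hb := h j c (by rw [PySem.List.enumerate_cons]; exact List.mem_cons_self)
    have htl : ∀ i c', (i, c') ∈ PySem.List.enumerate xs' (j+1) → first < i ∧ i < last :=
      fun i c' hm => h i c' (by rw [PySem.List.enumerate_cons]; exact List.mem_cons_of_mem _ hm)
    by_cases hL : pvIsL c
    · rw [pvStepR, if_pos ⟨hb.1, hb.2, by simpa [pv_memAB] using hL⟩]
      cases rest with
      | nil =>
        rw [ih (j+1) (res ++ [c]) [] htl]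
        simp [pvMerge, hL, List.countP_cons]
      | cons d rest' =>
        rw [ih (j+1) (res ++ [d]) rest' htl]
        simp [pvMerge, hL, List.countP_cons]
    · rw [pvStepR, if_neg (by simp [pv_memAB, hL])]
      rw [ih (j+1) (res ++ [c]) rest htl]
      simp [pvMerge, hL, List.countP_cons]

theorem my_take_set (l : List Char) (n : Nat) (d : Char) (h : n < l.length) :
    (l.set n d).take (n+1) = l.take n ++ [d] := by
  apply List.ext_getElem
  · simp; omega
  · intro i h1 h2
    simp only [List.getElem_take, List.getElem_set]
    by_cases hi : i = n
    · subst hi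
      have hl : (l.take i).length = i := by simp; omega
      rw [List.getElem_append_right (by omega)]
      simp [hl]
    · have hi' : i < n := by simp at h1; omega
      rw [List.getElem_append_left (by simp; omega)]
      simp [List.getElem_take]
      omega

theorem my_drop_set (l : List Char) (n m : Nat) (d : Char) (h : n < m) :
    (l.set n d).drop m = l.drop m := by
  apply List.ext_getElem
  · simp
  · intro i h1 h2
    simp only [List.getElem_drop, List.getElem_set]
    have : ¬ (n = m + i) := by omega
    simp [this]

theorem pv_foldA (m : Nat) : ∀ (s k : Nat) (a dic : List Char), s + m ≤ a.length →
    k + ((a.drop s).take m).countP pvIsL ≤ dic.length →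
    (List.range' s m).foldl (pvStepA dic) (a, k)
      = (a.take s ++ pvMerge ((a.drop s).take m) (dic.drop k) ++ a.drop (s + m),
         k + ((a.drop s).take m).countP pvIsL) := by
  induction m with
  | zero =>
    intro s k a dic hlen hcnt
    simp [pvMerge, List.take_append_drop]
  | succ m ih =>
    intro s k a dic hlen hcnt
    have hs : s < a.length := by omega
    rw [List.range'_succ, List.foldl_cons]
    have hdrop : a.drop s = a[s] :: a.drop (s+1) := List.drop_eq_getElem_cons hs
    have hmid : (a.drop s).take (m+1) = a[s] :: ((a.drop (s+1)).take m) := by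
      rw [hdrop, List.take_succ_cons]
    rw [pvStepA]
    rw [List.getD_eq_getElem _ _ hs]
    by_cases hL : pvIsL a[s]
    · rw [if_pos hL]
      have hcnt1 : ((a.drop s).take (m+1)).countP pvIsL
          = ((a.drop (s+1)).take m).countP pvIsL + 1 := by
        rw [hmid, List.countP_cons, if_pos hL]
      have hk : k < dic.length := by omega
      have hdic : dic.drop k = dic[k] :: dic.drop (k+1) := List.drop_eq_getElem_cons hk
      set a' := a.set s dic[k] with ha'
      have hgetD : dic.getD k ' ' = dic[k] := List.getD_eq_getElem _ _ hk
      rw [hgetD]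
      have hlen' : (s+1) + m ≤ a'.length := by simp [ha']; omega
      have hmid' : (a'.drop (s+1)).take m = (a.drop (s+1)).take m := by
        rw [my_drop_set _ _ _ _ (by omega)]
      rw [ih (s+1) (k+1) a' dic hlen' (by rw [hmid']; omega)]
      rw [hmid', hmid]
      rw [hdic]
      simp only [pvMerge, if_pos hL]
      have htake' : a'.take (s+1) = a.take s ++ [dic[k]] := my_take_set _ _ _ hs
      have hdrop' : a'.drop (s+1+m) = a.drop (s+1+m) := my_drop_set _ _ _ _ (by omega)
      rw [htake', hdrop']
      simp only [Prod.mk.injEq]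
      refine ⟨?_, ?_⟩
      · simp only [List.append_assoc, List.singleton_append]
        have : s + (m+1) = s+1+m := by omega
        rw [this]
      · simp only [List.countP_cons, if_pos hL]
        omega
    · rw [if_neg hL]
      have hcnt1 : ((a.drop s).take (m+1)).countP pvIsL
          = ((a.drop (s+1)).take m).countP pvIsL := by
        rw [hmid, List.countP_cons, if_neg hL]
        omega
      rw [ih (s+1) k a dic (by omega) (by omega)]
      rw [hmid]
      simp only [pvMerge, if_neg hL]
      have htake : a.take (s+1) = a.take s ++ [a[s]] := by
        rw [List.take_succ, List.getElem?_eq_getElem hs]; rfl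
      rw [htake]
      simp only [Prod.mk.injEq]
      refine ⟨?_, ?_⟩
      · simp only [List.append_assoc, List.singleton_append]
        have : s + (m+1) = s+1+m := by omega
        rw [this]
      · simp only [List.countP_cons, if_neg hL]
        omega

theorem my_flatMap_congr {α β : Type} (l : List α) (f g : α → List β) (h : ∀ x ∈ l, f x = g x) :
    l.flatMap f = l.flatMap g := by
  induction l with
  | nil => rfl
  | cons x xs ih => simp only [List.flatMap_cons, h x (by simp), ih fun y hy => h y (by simp [hy])]

theorem pv_permL (l : List Char) : ∀ (M : List Char), l.Nodup → (∀ x ∈ M, x ∈ l) →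
    (l.flatMap fun c => List.replicate (M.count c) c).Perm M := by
  induction l with
  | nil =>
    intro M _ hM
    have : M = [] := List.eq_nil_iff_forall_not_mem.mpr (fun x hx => by simpa using hM x hx)
    simp [this]
  | cons c l' ih =>
    intro M hnd hM
    rw [List.nodup_cons] at hnd
    rw [List.flatMap_cons]
    have h1 : List.replicate (M.count c) c = M.filter (fun x => x == c) := (List.filter_beq c).symm
    have h2 : l'.flatMap (fun d => List.replicate (M.count d) d)
        = l'.flatMap (fun d => List.replicate ((M.filter (fun x => !(x == c))).count d) d) := by
      apply my_flatMap_congr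
      intro d hd
      have hdc : (d == c) = false := by
        simp only [beq_eq_false_iff_ne]
        intro hdceq; exact hnd.1 (hdceq ▸ hd)
      rw [List.count_filter (by simp [hdc])]
    rw [h1, h2]
    have hperm := ih (M.filter (fun x => !(x == c))) hnd.2 (fun x hx => by
      have hxM := List.mem_of_mem_filter hx
      have hxne : (x == c) = false := by
        have := List.of_mem_filter hx
        simpa using this
      have := hM x hxM
      simp only [List.mem_cons] at this
      rcases this with h | h
      · exact absurd h (by simpa using hxne)
      · exact h)
    exact (hperm.append_left _).trans (List.filter_append_perm _ M)

theorem pv_pairwiseL (l : List Char) (k : Char → Nat) (h : l.Pairwise (· < ·)) :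
    (l.flatMap fun c => List.replicate (k c) c).Pairwise (· ≤ ·) := by
  induction l with
  | nil => simp
  | cons c l' ih =>
    rw [List.pairwise_cons] at h
    rw [List.flatMap_cons, List.pairwise_append]
    refine ⟨?_, ih h.2, ?_⟩
    · rw [List.pairwise_replicate]
      right; exact le_refl c
    · intro a ha b hb
      have ha' : a = c := List.eq_of_mem_replicate ha
      rw [List.mem_flatMap] at hb
      obtain ⟨d, hd, hbd⟩ := hb
      have hb' : b = d := List.eq_of_mem_replicate hbd
      subst ha'; subst hb'
      exact le_of_lt (h.1 _ hd)

theorem pv_sortedEq (M : List Char) (h : ∀ c ∈ M, pvIsL c = true) :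
    PySem.List.sorted M (fun x => x)
      = pvAlphaB.flatMap (fun c => List.replicate (M.count c) c) := by
  apply PySem.List.sorted_id_eq_of_perm_of_pairwise
  · refine pv_permL pvAlphaB M nodupB (fun x hx => ?_)
    have hxA : x ∈ pvAlphaA := by
      have := h x hx
      simpa [pvIsL] using this
    exact permAB.mem_iff.mp hxA
  · exact pv_pairwiseL pvAlphaB _ pairB

theorem pv_counts (mid : List Char) (c : Char) :
    ((mid.foldl pvStepCount PySem.Dict.empty).getD c 0) = ((mid.filter pvIsL).count c : Int) := by
  have hstep : pvStepCount
      = fun (d : PySem.Dict Char Int) c => if pvIsL c = true then d.insert c (d.getD c 0 + 1) else d := by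
    funext d c
    rw [pvStepCount, pv_memAB]
  rw [hstep, ← List.foldl_filter]
  rw [PySem.Dict.getD_foldl_insert_add_one]
  simp [PySem.Dict.getD, PySem.Dict.empty, PySem.Dict.get?]

-- ===== VERDICT (by name: the statement is the Claim_ definition above) =====
theorem map_item_spec : Claim_equal_map_item := by
  unfold Claim_equal_map_item Spec_map_item
  intro item _
  simp only [map_item, map_item_alt]
  rw [pv_scanFirst_eq, pv_scanLast_eq _ _ le_rfl, List.take_length,
    pv_foldFL item.toList 0 (-1, -1) le_rfl]
  rw [List.drop_zero]
  set cs := item.toList with hcs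
  cases hf : cs.findIdx? pvIsL with
  | none =>
    have hrev : cs.reverse.findIdx? pvIsL = none := by
      rw [List.findIdx?_eq_none_iff] at hf ⊢
      intro x hx; exact hf x (List.mem_reverse.mp hx)
    rw [hrev]
    simp only [Option.elim_none]
    -- A side: slice [1:0] is empty, loop range is empty
    have hsA : PySem.List.slice cs (some (((0:Nat):Int) + 1)) (some ((0:Nat):Int)) = [] := by
      rw [show (((0:Nat):Int) + 1) = ((1:Nat):Int) by norm_num]
      rw [PySem.List.slice_natCast]
      simp
    rw [hsA]
    simp only [List.filter_nil]
    rw [show (0 : Nat) - (0 + 1) = 0 by omega]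
    simp only [List.range'_zero, List.foldl_nil]
    -- B side: no letter anywhere, the rebuild loop copies cs
    have hskip := pv_foldSkip (-1) (-1) cs 0 []
      (pvAlphaB.flatMap fun c =>
        List.replicate (((PySem.List.slice cs (some ((-1) + 1)) (some (-1))).foldl pvStepCount
          PySem.Dict.empty).getD c 0).toNat c)
      (fun i c hm => by intro ⟨h1, h2, _⟩; omega)
    rw [hskip]
    simp
  | some f =>
    have hflen : f < cs.length := by
      have := (List.findIdx?_eq_some_iff_findIdx_eq.mp hf).1
      exact this
    have hfL : pvIsL cs[f] = true := pv_letter_at hf hflen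
    cases hr : cs.reverse.findIdx? pvIsL with
    | none =>
      exfalso
      rw [List.findIdx?_eq_none_iff] at hr
      have hmem : cs[f] ∈ cs.reverse := List.mem_reverse.mpr (List.getElem_mem hflen)
      have hfalse := hr _ hmem
      exact absurd (hfL.symm.trans hfalse) (by decide)
    | some r =>
      have hrlt : r < cs.length := pv_revlt hr
      set l := cs.length - 1 - r with hl
      have hllen : l < cs.length := by omega
      have hlL : pvIsL cs[l] = true := by
        have h1 := pv_letter_at (xs := cs.reverse) hr (by simpa using hrlt)
        rw [List.getElem_reverse] at h1
        simpa [hl, List.length_reverse] using h1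
      have hfle : f ≤ l := pv_first_min hf l hllen hlL
      simp only [Option.elim_some]
      simp only [Nat.zero_add, zero_add, show ((-1:Int) < 0) = True by simp, if_true]
      rw [← hl]
      by_cases hfl : f = l
      · -- single letter position: both sides return the string unchanged
        have hsA : PySem.List.slice cs (some (((f:Nat):Int) + 1)) (some ((l:Nat):Int)) = [] := by
          rw [show (((f:Nat):Int) + 1) = (((f+1 : Nat)):Int) by push_cast; ring]
          rw [PySem.List.slice_natCast]
          rw [show l - (f+1) = 0 by omega]
          simp
        rw [hsA]
        simp only [List.filter_nil]
        rw [show l - (f + 1) = 0 by omega]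
        simp only [List.range'_zero, List.foldl_nil]
        have hz : ∀ i c, (i, c) ∈ PySem.List.enumerate cs 0 →
            ¬((f:Int) < i ∧ i < (l:Int) ∧ pvIsL c) := by
          intro i c _
          intro ⟨h1, h2, _⟩
          omega
        rw [pv_foldSkip _ _ _ _ _ _ hz]
        simp
      · have hlt : f < l := by omega
        -- the middle segment
        set mid := (cs.drop (f+1)).take (l - (f+1)) with hmiddef
        have hcast1 : ((f:Nat):Int) + 1 = (((f+1 : Nat)):Int) := by push_cast; ring
        have hsliceA : PySem.List.slice cs (some (((f:Nat):Int) + 1)) (some ((l:Nat):Int)) = mid := by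
          rw [hcast1, PySem.List.slice_natCast]
        have hmidlen : mid.length = l - (f+1) := by
          simp only [hmiddef, List.length_take, List.length_drop]
          omega
        -- dic = sorted letters of mid; ordered = counting-sort of the same letters
        set M := mid.filter pvIsL with hM
        have hdic : PySem.List.sorted M (fun x => x)
            = pvAlphaB.flatMap (fun c => List.replicate (M.count c) c) :=
          pv_sortedEq M (fun c hc => List.of_mem_filter hc)
        have hdiclen : (PySem.List.sorted M (fun x => x)).length = mid.countP pvIsL := by
          rw [PySem.List.length_sorted, hM, ← List.countP_eq_length_filter]
        -- replace the slice by mid on both sides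
        rw [hsliceA]
        -- B's ordered list equals the flatMap of counts of M
        have hordered : (pvAlphaB.flatMap fun c =>
            List.replicate ((mid.foldl pvStepCount PySem.Dict.empty).getD c 0).toNat c)
            = pvAlphaB.flatMap (fun c => List.replicate (M.count c) c) := by
          apply my_flatMap_congr
          intro c _
          rw [pv_counts]
          simp [hM]
        rw [hordered]
        -- A's loop
        have hA := pv_foldA (l - (f+1)) (f+1) 0 cs (PySem.List.sorted M (fun x => x))
          (by omega) (by rw [hdiclen]; simp [hmiddef])
        rw [hA]
        simp only [List.drop_zero]
        -- B's rebuild loop: split cs into three zones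
        have hsplit : cs = cs.take (f+1) ++ (mid ++ cs.drop l) := by
          have h2 : mid ++ (cs.drop (f+1)).drop (l - (f+1)) = cs.drop (f+1) :=
            List.take_append_drop _ _
          rw [List.drop_drop] at h2
          rw [show (f+1) + (l - (f+1)) = l by omega] at h2
          rw [h2, List.take_append_drop]
        have hlen1 : (cs.take (f+1)).length = f+1 := by
          simp [List.length_take]; omega
        have henum : PySem.List.enumerate cs 0
            = PySem.List.enumerate (cs.take (f+1)) 0
              ++ (PySem.List.enumerate mid ((f:Int)+1)
                  ++ PySem.List.enumerate (cs.drop l) (l:Int)) := by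
          conv_lhs => rw [hsplit]
          rw [PySem.List.enumerate_append, PySem.List.enumerate_append, hlen1, hmidlen]
          have e1 : (0:Int) + ((f+1 : Nat):Int) = (f:Int) + 1 := by push_cast; ring
          have e2 : (f:Int) + 1 + ((l - (f+1) : Nat):Int) = (l:Int) := by
            push_cast [Nat.cast_sub (by omega : f + 1 ≤ l)]; ring
          rw [e1, e2]
        rw [henum, List.foldl_append, List.foldl_append]
        have hz1 : ∀ i c, (i, c) ∈ PySem.List.enumerate (cs.take (f+1)) 0 →
            ¬((f:Int) < i ∧ i < (l:Int) ∧ pvIsL c) := by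
          intro i c hm
          rw [PySem.List.mem_enumerate_iff] at hm
          obtain ⟨k, hk, hp⟩ := hm
          cases hp
          rw [hlen1] at hk
          intro ⟨h1, _, _⟩
          omega
        have hz2 : ∀ i c, (i, c) ∈ PySem.List.enumerate mid ((f:Int)+1) →
            (f:Int) < i ∧ i < (l:Int) := by
          intro i c hm
          rw [PySem.List.mem_enumerate_iff] at hm
          obtain ⟨k, hk, hp⟩ := hm
          cases hp
          rw [hmidlen] at hk
          constructor <;> omega
        have hz3 : ∀ i c, (i, c) ∈ PySem.List.enumerate (cs.drop l) (l:Int) →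
            ¬((f:Int) < i ∧ i < (l:Int) ∧ pvIsL c) := by
          intro i c hm
          rw [PySem.List.mem_enumerate_iff] at hm
          obtain ⟨k, hk, hp⟩ := hm
          cases hp
          intro ⟨_, h2, _⟩
          omega
        rw [pv_foldSkip _ _ _ _ _ _ hz1, pv_foldMid _ _ _ _ _ _ hz2,
          pv_foldSkip _ _ _ _ _ _ hz3]
        rw [← hdic]
        simp only [List.nil_append]
        rw [show f + 1 + (l - (f+1)) = l by omega, ← hmiddef]
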